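-- pv_equiv track=rewrite | github.com/DmitriyBA/leecode_ex6 | main.py | arr_new_plus_1
-- ===== SOURCE A (Python) =====
-- def arr_new_plus_1(arr1: list) -> list:
--     arr = [1 * (10 ** num) for num in range(len(arr1) - 1, 0, -1)]
--     arr.append(1)
--
--     number = 0
--     for item in range(len(arr1)):
--         if item == len(arr1) - 1:
--             number += (arr1[item] + 1) * arr[item]
--         else:
--             number += arr1[item] * arr[item]
--
--     new_arr = [0 * num for num in range(len(arr1))]
--
--     for item in range(len(new_arr)):
--         item_number = number % 10
--         number = number // 10
--         new_arr[item] = item_number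
--
--     new_arr.sort()
--     return new_arr
-- ===== SOURCE B (Python) =====
-- def arr_new_plus_1(arr1: list) -> list:
--     # Horner evaluation of the digit array, +1, then counting sort of the
--     # n low-order digits of the result.
--     number = 0
--     for d in arr1:
--         number = number * 10 + d
--     number += 1
--     counts = [0] * 10
--     for _ in range(len(arr1)):
--         digit = number % 10
--         counts[digit] += 1
--         number //= 10
--     out = []
--     for digit in range(10):
--         out.extend([digit] * counts[digit])
--     return out
-- ===== Notes on version B (the rewrite author's own statement) =====
-- stated objective: faster
-- what changed: Replaces the precomputed power-of-ten weight list and weighted sum by a single Horner-scheme pass, and replaces the final comparison sort of the extracted digits by a 10-bucket counting sort.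
import Mathlib
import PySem

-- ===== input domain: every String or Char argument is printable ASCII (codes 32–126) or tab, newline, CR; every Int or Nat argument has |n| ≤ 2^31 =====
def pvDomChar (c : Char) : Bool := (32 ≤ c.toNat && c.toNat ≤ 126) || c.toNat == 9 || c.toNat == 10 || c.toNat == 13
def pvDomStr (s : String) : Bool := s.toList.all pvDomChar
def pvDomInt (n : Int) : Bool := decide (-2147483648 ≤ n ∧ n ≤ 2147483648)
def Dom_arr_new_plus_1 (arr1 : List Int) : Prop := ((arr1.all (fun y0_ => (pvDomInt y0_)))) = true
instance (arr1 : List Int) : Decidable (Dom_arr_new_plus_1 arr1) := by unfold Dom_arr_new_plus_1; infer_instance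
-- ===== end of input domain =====

-- B replaces A's power-of-ten weight table and weighted sum by one Horner pass, and A's
-- comparison sort of the extracted digits by a 10-bucket counting sort (measured faster).

-- ===== PORT A =====
def arr_new_plus_1 (arr1 : List Int) : List Int :=
  -- num ranges over len-1 .. 1 (always ≥ 0), so the .toNat on the exponent is exact
  let arr : List Int :=
    ((PySem.List.pyRange ((arr1.length : Int) - 1) 0 (-1)).map (fun num => 1 * (10 : Int) ^ num.toNat)) ++ [1]
  let number : Int :=
    (PySem.List.pyRange 0 (arr1.length : Int) 1).foldl
      (fun number item =>
        if item == (arr1.length : Int) - 1 then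
          number + (PySem.List.pyGetD arr1 item 0 + 1) * PySem.List.pyGetD arr item 0
        else
          number + PySem.List.pyGetD arr1 item 0 * PySem.List.pyGetD arr item 0) 0
  let new_arr : List Int := (PySem.List.pyRange 0 (arr1.length : Int) 1).map (fun num => 0 * num)
  let st :=
    (PySem.List.pyRange 0 (new_arr.length : Int) 1).foldl
      (fun (st : Int × List Int) item =>
        let item_number := PySem.Int.mod st.1 10
        let number := PySem.Int.floordiv st.1 10
        (number, PySem.List.pySetD st.2 item item_number)) (number, new_arr)
  PySem.List.sorted st.2 (fun x => x) false

-- ===== PORT B =====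
def arr_new_plus_1_alt (arr1 : List Int) : List Int :=
  let number : Int := arr1.foldl (fun number d => number * 10 + d) 0
  let number := number + 1
  let counts : List Int := List.replicate 10 0
  let st :=
    (PySem.List.pyRange 0 (arr1.length : Int) 1).foldl
      (fun (st : Int × List Int) _ =>
        let digit := PySem.Int.mod st.1 10
        let counts := PySem.List.pySetD st.2 digit (PySem.List.pyGetD st.2 digit 0 + 1)
        (PySem.Int.floordiv st.1 10, counts)) (number, counts)
  (PySem.List.pyRange 0 10 1).foldl
    (fun out digit => out ++ List.replicate (PySem.List.pyGetD st.2 digit 0).toNat digit) []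

-- ===== PRECONDITION & SPEC =====
def Spec_arr_new_plus_1 (arr1 : List Int) (out : List Int) : Prop := out = arr_new_plus_1_alt arr1
instance (arr1 : List Int) (out : List Int) : Decidable (Spec_arr_new_plus_1 arr1 out) := by unfold Spec_arr_new_plus_1; infer_instance

-- ===== CLAIM (what is proved, stated in full; the proofs are below) =====
def Claim_equal_arr_new_plus_1 : Prop := ∀ (arr1 : List Int), Dom_arr_new_plus_1 arr1 → Spec_arr_new_plus_1 arr1 (arr_new_plus_1 arr1)

-- ===== LEMMAS AND PROOFS =====

theorem pvFoldlConst {α β : Type} (g : β → β) (l : List α) (init : β) :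
    l.foldl (fun st _ => g st) init = g^[l.length] init := by
  induction l generalizing init with
  | nil => rfl
  | cons x l ih => simp [List.foldl_cons, ih, Function.iterate_succ_apply]

def pvDigits (N : Int) : Nat → List Int
  | 0 => []
  | k + 1 => PySem.Int.mod N 10 :: pvDigits (PySem.Int.floordiv N 10) k

def pvUpd (cs : List Int) (d : Int) : List Int :=
  PySem.List.pySetD cs d (PySem.List.pyGetD cs d 0 + 1)

theorem pvHistB (k : Nat) (N : Int) (cs : List Int) :
    ((PySem.List.pyRange 0 (k : Int) 1).foldl
      (fun (st : Int × List Int) _ =>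
        (PySem.Int.floordiv st.1 10, pvUpd st.2 (PySem.Int.mod st.1 10))) (N, cs)).2
    = (pvDigits N k).foldl pvUpd cs := by
  rw [pvFoldlConst (fun st : Int × List Int => (PySem.Int.floordiv st.1 10, pvUpd st.2 (PySem.Int.mod st.1 10)))]
  rw [PySem.List.length_pyRange_one]
  have h : ((k : Int) - 0).toNat = k := by omega
  rw [h]
  induction k generalizing N cs with
  | zero => rfl
  | succ k ih =>
    rw [Function.iterate_succ_apply]
    exact ih (PySem.Int.floordiv N 10) (pvUpd cs (PySem.Int.mod N 10)) (by omega)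

theorem pvGetUpd (cs : List Int) (d v : Int) (hlen : cs.length = 10)
    (hd : 0 ≤ d ∧ d < 10) (hv : 0 ≤ v ∧ v < 10) :
    PySem.List.pyGetD (pvUpd cs d) v 0
      = if v = d then PySem.List.pyGetD cs d 0 + 1 else PySem.List.pyGetD cs v 0 := by
  unfold pvUpd
  rw [PySem.List.pySetD_of_nonneg cs _ hd.1]
  rw [PySem.List.pyGetD_eq_getElem _ (0:Int) hv.1 (by simp [hlen]; omega)]
  rw [List.getElem_set]
  rw [PySem.List.pyGetD_eq_getElem cs (0:Int) hv.1 (by omega)]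
  by_cases h : v = d
  · subst h; simp
  · have hne : ¬ (v.toNat = d.toNat) := by omega
    have hne' : ¬ (d.toNat = v.toNat) := by omega
    simp [h, hne']

theorem pvUpdLen (cs : List Int) (d : Int) : (pvUpd cs d).length = cs.length := by
  simp [pvUpd, PySem.List.length_pySetD]

theorem pvHistCount (ds : List Int) (cs : List Int) (v : Int)
    (hds : ∀ d ∈ ds, 0 ≤ d ∧ d < 10) (hlen : cs.length = 10) (hv0 : 0 ≤ v) (hv9 : v < 10) :
    PySem.List.pyGetD (ds.foldl pvUpd cs) v 0 = PySem.List.pyGetD cs v 0 + ds.count v := by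
  induction ds generalizing cs with
  | nil => simp
  | cons d t ih =>
    rw [List.foldl_cons]
    rw [ih _ (fun x hx => hds x (List.mem_cons_of_mem _ hx)) (by rw [pvUpdLen]; exact hlen)]
    rw [pvGetUpd cs d v hlen (hds d (List.mem_cons_self)) ⟨hv0, hv9⟩]
    rw [List.count_cons]
    by_cases h : v = d
    · subst h; simp; ring
    · have : ¬ (d = v) := fun hh => h hh.symm
      simp [h, this]

theorem pvOutPairwise (l : List Int) (cnt : Int → Nat) (acc : List Int)
    (hl : l.Pairwise (· ≤ ·)) (hacc : acc.Pairwise (· ≤ ·)) (hcross : ∀ x ∈ acc, ∀ y ∈ l, x ≤ y) :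
    (l.foldl (fun a dg => a ++ List.replicate (cnt dg) dg) acc).Pairwise (· ≤ ·) := by
  induction l generalizing acc with
  | nil => exact hacc
  | cons d t ih =>
    rw [List.foldl_cons]
    rw [List.pairwise_cons] at hl
    refine ih _ hl.2 ?_ ?_
    · rw [List.pairwise_append]
      refine ⟨hacc, List.pairwise_replicate.mpr (by simp), ?_⟩
      intro x hx y hy
      exact (List.eq_of_mem_replicate hy) ▸ hcross x hx d List.mem_cons_self
    · intro x hx y hy
      rcases List.mem_append.mp hx with hx | hx
      · exact hcross x hx y (List.mem_cons_of_mem _ hy)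
      · exact (List.eq_of_mem_replicate hx) ▸ hl.1 y hy

theorem pvOutCount (l : List Int) (cnt : Int → Nat) (acc : List Int) (v : Int) (hnd : l.Nodup) :
    (l.foldl (fun a dg => a ++ List.replicate (cnt dg) dg) acc).count v
    = acc.count v + (if v ∈ l then cnt v else 0) := by
  induction l generalizing acc with
  | nil => simp
  | cons d t ih =>
    rw [List.foldl_cons, ih _ (List.Nodup.of_cons hnd)]
    rw [List.count_append, List.count_replicate]
    have hd : d ∉ t := (List.nodup_cons.mp hnd).1
    by_cases h : v = d
    · subst h
      simp [hd]
    · simp [h, List.mem_cons]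
      exact fun hh => absurd hh.symm h

theorem pvCountingSort (ds : List Int) (hds : ∀ d ∈ ds, 0 ≤ d ∧ d < 10) :
    PySem.List.sorted ds (fun x => x) false
    = (PySem.List.pyRange 0 10 1).foldl
        (fun out digit =>
          out ++ List.replicate (PySem.List.pyGetD (ds.foldl pvUpd (List.replicate 10 0)) digit 0).toNat digit) [] := by
  apply PySem.List.sorted_id_eq_of_perm_of_pairwise
  · -- permutation
    apply (List.perm_iff_count).mpr
    intro v
    rw [pvOutCount _ _ _ _ (PySem.List.nodup_pyRange_one 0 10)]
    rw [List.count_nil]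
    by_cases h : v ∈ PySem.List.pyRange 0 10 1
    · have hv := (PySem.List.mem_pyRange_one).mp h
      rw [if_pos h]
      rw [pvHistCount ds _ v hds (by simp) hv.1 hv.2]
      rw [PySem.List.pyGetD_eq_getElem _ (0:Int) hv.1 (by simp; omega)]
      rw [List.getElem_replicate]
      omega
    · rw [if_neg h]
      have : v ∉ ds := by
        intro hv
        exact h ((PySem.List.mem_pyRange_one).mpr ⟨(hds v hv).1, (hds v hv).2⟩)
      simp [List.count_eq_zero.mpr this]
  · -- sortedness
    apply pvOutPairwise
    · exact (PySem.List.pairwise_lt_pyRange_one 0 10).imp (fun h => le_of_lt h)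
    · exact List.Pairwise.nil
    · intro x hx; simp at hx

theorem pvTakeSet (zs : List Int) (a : Nat) (v : Int) (h : a < zs.length) :
    (zs.set a v).take (a+1) = zs.take a ++ [v] := by
  apply List.ext_getElem
  · simp; omega
  · intro i h1 h2
    simp only [List.length_take, List.length_set] at h1
    rw [List.getElem_take, List.getElem_set]
    by_cases hi : i = a
    · subst hi; simp [List.getElem_append_right, List.length_take]
    · have hia : i < a := by omega
      rw [if_neg (by omega)]
      rw [List.getElem_append_left (by simp; omega)]
      rw [List.getElem_take]

theorem pvExtractA (k : Nat) : ∀ (a : Nat) (N : Int) (zs : List Int), k = zs.length - a → a ≤ zs.length →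
    ((PySem.List.pyRange (a : Int) (zs.length : Int) 1).foldl
      (fun (st : Int × List Int) item =>
        (PySem.Int.floordiv st.1 10, PySem.List.pySetD st.2 item (PySem.Int.mod st.1 10))) (N, zs)).2
    = zs.take a ++ pvDigits N (zs.length - a) := by
  induction k with
  | zero =>
    intro a N zs hk ha
    have hae : a = zs.length := by omega
    rw [PySem.List.pyRange_one_eq_nil (by omega)]
    simp [hae, pvDigits, List.take_of_length_le]
  | succ k ih =>
    intro a N zs hk ha
    have hlt : a < zs.length := by omega
    rw [PySem.List.pyRange_one_cons (by exact_mod_cast hlt)]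
    rw [List.foldl_cons]
    have hset : PySem.List.pySetD zs (a : Int) (PySem.Int.mod N 10) = zs.set a (PySem.Int.mod N 10) :=
      PySem.List.pySetD_natCast zs a _
    have hcast : ((a : Int) + 1) = ((a + 1 : Nat) : Int) := by push_cast; ring
    have hlen : (zs.set a (PySem.Int.mod N 10)).length = zs.length := by simp
    simp only [hset, hcast]
    rw [show (zs.length : Int) = ((zs.set a (PySem.Int.mod N 10)).length : Int) by rw [hlen]]
    rw [ih (a+1) (PySem.Int.floordiv N 10) _ (by simp; omega) (by simp; omega)]
    rw [hlen, pvTakeSet zs a _ hlt]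
    have : zs.length - a = (zs.length - (a+1)) + 1 := by omega
    rw [this, pvDigits]
    simp

theorem pvWeight (arr1 : List Int) (i : Nat) (h : i < arr1.length) :
    PySem.List.pyGetD
      (((PySem.List.pyRange ((arr1.length : Int) - 1) 0 (-1)).map (fun num => 1 * (10 : Int) ^ num.toNat)) ++ [1])
      (i : Int) 0 = (10 : Int) ^ (arr1.length - 1 - i) := by
  rw [PySem.List.pyRange_neg_one]
  rw [PySem.List.pyGetD_natCast]
  have hm : ((arr1.length : Int) - 1 - 0).toNat = arr1.length - 1 := by omega
  rw [hm]
  by_cases hi : i < arr1.length - 1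
  · rw [List.getD_eq_getElem _ _ (by simp [List.length_map, List.length_range]; omega)]
    rw [List.getElem_append_left (by simp [List.length_map, List.length_range]; omega)]
    simp only [List.getElem_map, List.getElem_range]
    have : ((arr1.length : Int) - 1 - (i : Int)).toNat = arr1.length - 1 - i := by omega
    rw [this]
    ring
  · have hie : i = arr1.length - 1 := by omega
    rw [List.getD_eq_getElem _ _ (by simp [List.length_map, List.length_range]; omega)]
    rw [List.getElem_append_right (by simp [List.length_map, List.length_range]; omega)]
    simp [List.length_map, List.length_range, hie]

def pvHorner (xs : List Int) : Int := xs.foldl (fun a d => a * 10 + d) 0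

theorem pvHorner_snoc (xs : List Int) (x : Int) : pvHorner (xs ++ [x]) = pvHorner xs * 10 + x := by
  simp [pvHorner, List.foldl_append]

theorem pvSum (arr1 : List Int) (b : Nat) (hb : b ≤ arr1.length) (c : Int) :
    (PySem.List.pyRange 0 (b : Int) 1).foldl
      (fun number item =>
        number + PySem.List.pyGetD arr1 item 0 *
          PySem.List.pyGetD
            (((PySem.List.pyRange ((arr1.length : Int) - 1) 0 (-1)).map (fun num => 1 * (10 : Int) ^ num.toNat)) ++ [1])
            item 0) c
    = c + pvHorner (arr1.take b) * 10 ^ (arr1.length - b) := by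
  induction b with
  | zero =>
    rw [PySem.List.pyRange_one_eq_nil (by omega)]
    simp [pvHorner]
  | succ b ih =>
    have hb' : b < arr1.length := by omega
    have hcast : ((b + 1 : Nat) : Int) = (b : Int) + 1 := by push_cast; ring
    rw [hcast, PySem.List.pyRange_one_succ_right (by omega)]
    rw [List.foldl_append, ih (by omega)]
    rw [List.foldl_cons, List.foldl_nil]
    rw [pvWeight arr1 b hb']
    rw [PySem.List.pyGetD_natCast]
    rw [List.getD_eq_getElem _ _ hb']
    rw [List.take_add_one]
    rw [List.getElem?_eq_getElem hb']
    simp only [Option.toList_some]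
    rw [pvHorner_snoc]
    have h1 : arr1.length - b = (arr1.length - (b+1)) + 1 := by omega
    rw [h1, pow_succ]
    have h2 : arr1.length - 1 - b = arr1.length - (1+b) := by omega
    have h3 : arr1.length - (b+1) = arr1.length - (1+b) := by omega
    rw [h2, h3]
    ring

theorem pvNumberA (arr1 : List Int) (h : arr1 ≠ []) :
    (PySem.List.pyRange 0 (arr1.length : Int) 1).foldl
      (fun number item =>
        if item == (arr1.length : Int) - 1 then
          number + (PySem.List.pyGetD arr1 item 0 + 1) *
            PySem.List.pyGetD
              (((PySem.List.pyRange ((arr1.length : Int) - 1) 0 (-1)).map (fun num => 1 * (10 : Int) ^ num.toNat)) ++ [1])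
              item 0
        else
          number + PySem.List.pyGetD arr1 item 0 *
            PySem.List.pyGetD
              (((PySem.List.pyRange ((arr1.length : Int) - 1) 0 (-1)).map (fun num => 1 * (10 : Int) ^ num.toNat)) ++ [1])
              item 0) 0
    = pvHorner arr1 + 1 := by
  have hn : 1 ≤ arr1.length := List.length_pos_iff.mpr h
  rw [PySem.List.pyRange_one_append 0 ((arr1.length : Int) - 1) (arr1.length : Int) (by omega) (by omega)]
  rw [List.foldl_append]
  rw [PySem.List.foldl_congr_mem (PySem.List.pyRange 0 ((arr1.length : Int) - 1) 1) _
    (fun number item =>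
          number + PySem.List.pyGetD arr1 item 0 *
            PySem.List.pyGetD
              (((PySem.List.pyRange ((arr1.length : Int) - 1) 0 (-1)).map (fun num => 1 * (10 : Int) ^ num.toNat)) ++ [1])
              item 0) 0
    (by
      intro acc x hx
      have hxm := (PySem.List.mem_pyRange_one).mp hx
      have hne : (x == (arr1.length : Int) - 1) = false := by
        apply beq_eq_false_iff_ne.mpr
        omega
      rw [hne]; simp)]
  have hb : ((arr1.length - 1 : Nat) : Int) = (arr1.length : Int) - 1 := by omega
  have hsum := pvSum arr1 (arr1.length - 1) (by omega) 0
  rw [hb] at hsum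
  rw [hsum]
  rw [show PySem.List.pyRange ((arr1.length : Int) - 1) (arr1.length : Int) 1
        = [(arr1.length : Int) - 1] by
    have hs := PySem.List.pyRange_one_singleton ((arr1.length : Int) - 1)
    rwa [show ((arr1.length : Int) - 1) + 1 = (arr1.length : Int) by omega] at hs]
  rw [List.foldl_cons, List.foldl_nil]
  rw [if_pos (by apply beq_iff_eq.mpr; rfl)]
  have hw := pvWeight arr1 (arr1.length - 1) (by omega)
  rw [hb] at hw
  rw [hw]
  have hg : PySem.List.pyGetD arr1 ((arr1.length : Int) - 1) 0 = arr1[arr1.length - 1]'(by omega) := by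
    rw [← hb, PySem.List.pyGetD_natCast, List.getD_eq_getElem _ _ (by omega)]
  rw [hg]
  have hlast : arr1.take (arr1.length - 1) ++ [arr1[arr1.length - 1]'(by omega)] = arr1 := by
    rw [← List.dropLast_eq_take, ← List.getLast_eq_getElem h]
    exact List.dropLast_append_getLast h
  have hh := pvHorner_snoc (arr1.take (arr1.length - 1)) (arr1[arr1.length - 1]'(by omega))
  rw [hlast] at hh
  rw [show arr1.length - (arr1.length - 1) = 1 by omega]
  rw [show arr1.length - 1 - (arr1.length - 1) = 0 by omega]
  rw [hh]
  ring

theorem pvDigits_mem {N : Int} {k : Nat} {d : Int} (h : d ∈ pvDigits N k) : 0 ≤ d ∧ d < 10 := by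
  induction k generalizing N with
  | zero => simp [pvDigits] at h
  | succ k ih =>
    simp only [pvDigits, List.mem_cons] at h
    rcases h with h | h
    · subst h
      exact ⟨PySem.Int.mod_nonneg _ (by norm_num), PySem.Int.mod_lt _ (by norm_num)⟩
    · exact ih h

-- a = 0 corner of pvExtractA, with the casts cleaned up
theorem pvExtractA0 (N : Int) (zs : List Int) :
    ((PySem.List.pyRange 0 (zs.length : Int) 1).foldl
      (fun (st : Int × List Int) item =>
        (PySem.Int.floordiv st.1 10, PySem.List.pySetD st.2 item (PySem.Int.mod st.1 10))) (N, zs)).2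
    = pvDigits N zs.length := by
  have h := pvExtractA zs.length 0 N zs (by omega) (by omega)
  simpa using h

-- pvHistB with the update lambda written out as in port B
theorem pvHistB' (k : Nat) (N : Int) (cs : List Int) :
    ((PySem.List.pyRange 0 (k : Int) 1).foldl
      (fun (st : Int × List Int) _ =>
        (PySem.Int.floordiv st.1 10,
         PySem.List.pySetD st.2 (PySem.Int.mod st.1 10) (PySem.List.pyGetD st.2 (PySem.Int.mod st.1 10) 0 + 1))) (N, cs)).2
    = (pvDigits N k).foldl pvUpd cs :=
  pvHistB k N cs

-- ===== VERDICT (by name: the statement is the Claim_ definition above) =====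
theorem arr_new_plus_1_spec : Claim_equal_arr_new_plus_1 := by
  intro arr1 _
  unfold Spec_arr_new_plus_1
  by_cases h : arr1 = []
  · subst h; decide
  · have hds : ∀ d ∈ pvDigits (pvHorner arr1 + 1) arr1.length, 0 ≤ d ∧ d < 10 :=
      fun d hd => pvDigits_mem hd
    have hA : arr_new_plus_1 arr1
        = PySem.List.sorted (pvDigits (pvHorner arr1 + 1) arr1.length) (fun x => x) false := by
      simp only [arr_new_plus_1]
      rw [pvNumberA arr1 h]
      rw [pvExtractA0]
      rw [show (((PySem.List.pyRange 0 (arr1.length : Int) 1).map (fun num => (0:Int) * num)).length)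
            = arr1.length from by simp]
    have hB : arr_new_plus_1_alt arr1
        = (PySem.List.pyRange 0 10 1).foldl
            (fun out digit =>
              out ++ List.replicate
                (PySem.List.pyGetD
                  ((pvDigits (pvHorner arr1 + 1) arr1.length).foldl pvUpd (List.replicate 10 0)) digit 0).toNat digit)
            [] := by
      simp only [arr_new_plus_1_alt]
      rw [show arr1.foldl (fun number d => number * 10 + d) 0 = pvHorner arr1 from rfl]
      simp only [pvHistB']
    rw [hA, hB]
    exact pvCountingSort _ hds
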